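-- pv_equiv track=rewrite | github.com/daniellevin233/Python_projects | Introduction_to_Python/ex5_crossword/crossword.py | first_row_minor_diag
-- ===== SOURCE A (Python) =====
-- DELIMITER = ''
--
-- FIRST_ELEMENT_INDEX = 0
--
-- def first_row_minor_diag(lst_2d):
--     """
--     Function will create list of strings that sign the corresponding minor diagonal that begins on first row of matrix
--     and all other diagonal that begins on first row in crossword.
--     :param lst_2d: Two dimensional list of letters that sign the matrix.
--     :return: List of strings that sign coherent diagonals
--     """
--     lst_of_first_row_minor_diag_str = []
--     for j in range(len(lst_2d[FIRST_ELEMENT_INDEX]) - 2, -1, -1):  # again we run from the edge to the beginning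
--         # begin from (lst_2d[FIRST_ELEMENT_INDEX]) - 2) because we've already add the longest minor diagonal
--         str_minor_diag = DELIMITER
--         index_j = j  # internal index that begins from external one, it signs columns
--         for i in range(len(lst_2d)):
--             str_minor_diag += lst_2d[i][index_j]
--             if index_j == FIRST_ELEMENT_INDEX or i + 1 == len(lst_2d):  # check the border
--                 lst_of_first_row_minor_diag_str.append(str_minor_diag)
--                 break
--             index_j -= 1
--     return lst_of_first_row_minor_diag_str
-- ===== SOURCE B (Python) =====
-- def first_row_minor_diag(lst_2d):
--     """Index-first re-implementation: one pass buckets every cell by its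
--     anti-diagonal key s = i + col, then one output pass joins the buckets
--     for s = width-2 .. 0."""
--     width = len(lst_2d[0])
--     cells = [(i + col, ch) for i, row in enumerate(lst_2d) for col, ch in enumerate(row)]
--     buckets = {}
--     for key, ch in cells:
--         buckets[key] = buckets.get(key, []) + [ch]
--     return [''.join(buckets.get(s, [])) for s in range(width - 2, -1, -1)]
-- ===== Notes on version B (the rewrite author's own statement) =====
-- stated objective: alternative
-- what changed: Instead of re-walking each diagonal with a border-break inner loop, B makes one bucketing pass over all cells keyed by the anti-diagonal index s = i + col and then one output pass joining buckets for s = width-2 down to 0.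
import Mathlib
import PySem

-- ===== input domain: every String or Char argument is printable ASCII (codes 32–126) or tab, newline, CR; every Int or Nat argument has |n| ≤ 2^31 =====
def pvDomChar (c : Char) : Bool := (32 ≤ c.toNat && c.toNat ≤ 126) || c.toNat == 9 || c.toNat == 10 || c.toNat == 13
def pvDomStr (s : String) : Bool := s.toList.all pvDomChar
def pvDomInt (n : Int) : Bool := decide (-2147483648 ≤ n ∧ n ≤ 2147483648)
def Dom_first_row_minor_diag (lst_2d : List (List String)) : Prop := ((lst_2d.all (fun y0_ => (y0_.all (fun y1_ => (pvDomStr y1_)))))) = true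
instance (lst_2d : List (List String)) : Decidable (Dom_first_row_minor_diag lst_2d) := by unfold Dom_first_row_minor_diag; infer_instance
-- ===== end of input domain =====

-- B replaces A's per-diagonal border-break walk by one bucketing pass over all cells
-- (key s = i + col) and one output pass joining buckets for s = width-2 .. 0 (objective: alternative).

-- ===== PORT A =====
-- inner 'for i in range(len(lst_2d))' loop of A: walks one diagonal, appends the
-- finished string (some) on break; none = loop exhausted without a break (empty grid).
def pvInnerA : List (List String) → Int → String → Option String
  | [], _, _ => none
  | row :: rest, index_j, str =>
    let str2 := str ++ ((PySem.List.pyGet? row index_j).getD "")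
    if index_j == 0 || rest.isEmpty then some str2
    else pvInnerA rest (index_j - 1) str2

def first_row_minor_diag (lst_2d : List (List String)) : List String :=
  let width : Int := (((PySem.List.pyGet? lst_2d 0).getD []).length : Int)
  (PySem.List.pyRange (width - 2) (-1) (-1)).foldl
    (fun acc j =>
      match pvInnerA lst_2d j "" with
      | some s => acc ++ [s]
      | none => acc) []

-- ===== PORT B =====
def first_row_minor_diag_alt (lst_2d : List (List String)) : List String :=
  let width : Int := (((PySem.List.pyGet? lst_2d 0).getD []).length : Int)
  let cells : List (Int × String) :=
    (PySem.List.enumerate lst_2d).flatMap (fun p =>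
      (PySem.List.enumerate p.2).map (fun q => (p.1 + q.1, q.2)))
  let buckets : PySem.Dict Int (List String) :=
    cells.foldl (fun d p => d.modify p.1 [] (fun l => l ++ [p.2])) PySem.Dict.empty
  (PySem.List.pyRange (width - 2) (-1) (-1)).map
    (fun s => PySem.Str.join "" (buckets.getD s []))

-- ===== PRECONDITION & SPEC =====
-- Pre_: exactly the inputs where Python A returns — the grid is nonempty and every row i
-- that a first-row diagonal crosses is long enough (len(row i) ≥ width-1-i); elsewhere
-- A raises IndexError.
def Pre_first_row_minor_diag (lst_2d : List (List String)) : Prop :=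
  lst_2d ≠ [] ∧ ∀ i : Nat, i < lst_2d.length →
    i + 2 ≤ (lst_2d.headD []).length →
    (lst_2d.headD []).length ≤ (lst_2d.getD i []).length + i + 1
instance (lst_2d : List (List String)) : Decidable (Pre_first_row_minor_diag lst_2d) := by
  unfold Pre_first_row_minor_diag; infer_instance

def pvWitness_first_row_minor_diag : List (List String) := [["a", "b"], ["c", "d"]]

def Spec_first_row_minor_diag (lst_2d : List (List String)) (out : List String) : Prop := out = first_row_minor_diag_alt lst_2d
instance (lst_2d : List (List String)) (out : List String) : Decidable (Spec_first_row_minor_diag lst_2d out) := by unfold Spec_first_row_minor_diag; infer_instance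

-- ===== CLAIM (what is proved, stated in full; the proofs are below) =====
def Claim_equal_first_row_minor_diag : Prop := ∀ (lst_2d : List (List String)), Dom_first_row_minor_diag lst_2d → Pre_first_row_minor_diag lst_2d → Spec_first_row_minor_diag lst_2d (first_row_minor_diag lst_2d)

-- ===== LEMMAS AND PROOFS =====

-- the cells of the anti-diagonal with key s, top to bottom
def pvGather : List (List String) → Int → List String
  | [], _ => []
  | row :: rest, s =>
    (if h : 0 ≤ s ∧ s.toNat < row.length then [row[s.toNat]'h.2] else []) ++ pvGather rest (s - 1)

theorem pvGather_neg (g : List (List String)) : ∀ s : Int, s < 0 → pvGather g s = [] := by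
  induction g with
  | nil => intro s _; rfl
  | cons row rest ih =>
    intro s hs
    simp only [pvGather]
    rw [dif_neg (by omega), ih (s - 1) (by omega)]
    rfl

theorem pvJoin_singleton (x : String) : PySem.Str.join "" [x] = x := by
  apply String.toList_inj.mp
  simp [PySem.Str.toList_join, PySem.Chars.join_singleton]

theorem pvJoin_cons (x : String) (l : List String) :
    PySem.Str.join "" (x :: l) = x ++ PySem.Str.join "" l := by
  have key : (PySem.Str.join "" (x :: l)).toList = (x ++ PySem.Str.join "" l).toList := by
    cases l with
    | nil =>
      simp [PySem.Str.toList_join, PySem.Chars.join_singleton, PySem.Chars.join_nil]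
    | cons y t =>
      simp [PySem.Str.toList_join, PySem.Chars.join_cons_cons]
  exact String.toList_inj.mp key

def pvOk : List (List String) → Int → Prop
  | [], _ => True
  | row :: rest, s => (0 ≤ s → s.toNat < row.length) ∧ pvOk rest (s - 1)

theorem pvInnerA_eq (g : List (List String)) :
    ∀ (s : Int) (s0 : String), g ≠ [] → 0 ≤ s → pvOk g s →
      pvInnerA g s s0 = some (s0 ++ PySem.Str.join "" (pvGather g s)) := by
  induction g with
  | nil => intro s s0 h; exact absurd rfl h
  | cons row rest ih =>
    intro s s0 _ hs hok
    obtain ⟨hlen, hrest⟩ := hok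
    have hlt : s.toNat < row.length := hlen hs
    have hget : (PySem.List.pyGet? row s).getD "" = row[s.toNat] := by
      rw [PySem.List.pyGet?_of_nonneg row hs]
      simp [List.getElem?_eq_getElem hlt]
    simp only [pvInnerA, hget, pvGather]
    rw [dif_pos (show (0:Int) ≤ s ∧ s.toNat < row.length from ⟨hs, hlt⟩)]
    rw [List.singleton_append]
    by_cases h0 : s = 0
    · subst h0
      rw [if_pos (by simp)]
      rw [pvGather_neg rest (0 - 1) (by omega), pvJoin_singleton]
    · by_cases hre : rest = []
      · subst hre
        rw [if_pos (by simp)]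
        simp only [pvGather]
        rw [pvJoin_singleton]
      · rw [if_neg (by simp [h0, hre])]
        rw [ih (s - 1) (s0 ++ row[s.toNat]) hre (by omega) hrest]
        rw [pvJoin_cons, ← String.append_assoc]

-- one row's contribution to bucket t: the single cell at column t - k - c, if it exists
theorem pvRow_filter (row : List String) :
    ∀ (c k t : Int),
      (((PySem.List.enumerate row c).map (fun q => (k + q.1, q.2))).filter
        (fun p => p.1 == t)).map (fun p => p.2)
      = (if h : 0 ≤ t - k - c ∧ (t - k - c).toNat < row.length
         then [row[(t - k - c).toNat]'h.2] else []) := by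
  induction row with
  | nil =>
    intro c k t
    rw [dif_neg (by simp only [List.length_nil]; omega)]
    simp [PySem.List.enumerate]
  | cons x xs ih =>
    intro c k t
    rw [PySem.List.enumerate_cons]
    by_cases heq : k + c = t
    · have h0 : t - k - c = 0 := by omega
      simp only [List.map_cons, List.filter_cons]
      rw [if_pos (by simp [heq])]
      simp only [List.map_cons]
      rw [ih (c + 1) k t, dif_neg (by omega), dif_pos (by constructor <;> [omega; simp [h0]])]
      simp [h0]
    · simp only [List.map_cons, List.filter_cons]
      rw [if_neg (by simp; omega)]
      rw [ih (c + 1) k t]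
      by_cases hc : 0 ≤ t - k - c ∧ (t - k - c).toNat < (x :: xs).length
      · have h1 : 0 ≤ t - k - (c + 1) ∧ (t - k - (c + 1)).toNat < xs.length := by
          constructor <;> [omega; (simp at hc; omega)]
        rw [dif_pos h1, dif_pos hc]
        have hidx : (t - k - c).toNat = (t - k - (c + 1)).toNat + 1 := by omega
        simp [hidx]
      · rw [dif_neg ?_, dif_neg hc]
        intro h1
        simp at hc h1
        omega

-- the flatMap of enumerated rows, filtered at key t, is exactly the diagonal pvGather
theorem pvCells_filter (g : List (List String)) :
    ∀ (k t : Int),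
      (((PySem.List.enumerate g k).flatMap (fun p =>
          (PySem.List.enumerate p.2).map (fun q => (p.1 + q.1, q.2)))).filter
        (fun p => p.1 == t)).map (fun p => p.2)
      = pvGather g (t - k) := by
  induction g with
  | nil => intro k t; simp [PySem.List.enumerate, pvGather]
  | cons row rest ih =>
    intro k t
    rw [PySem.List.enumerate_cons]
    simp only [List.flatMap_cons, List.filter_append, List.map_append]
    rw [pvRow_filter row 0 k t, ih (k + 1) t]
    simp only [pvGather]
    have harith : t - k - 0 = t - k := by omega
    have harith2 : t - (k + 1) = t - k - 1 := by omega
    rw [harith, harith2]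

theorem pvBucket_eq (g : List (List String)) (t : Int) :
    (((PySem.List.enumerate g).flatMap (fun p =>
        (PySem.List.enumerate p.2).map (fun q => (p.1 + q.1, q.2)))).foldl
      (fun d p => d.modify p.1 [] (fun l => l ++ [p.2])) PySem.Dict.empty).getD t []
    = pvGather g t := by
  rw [PySem.Dict.getD_foldl_modify_append]
  rw [PySem.Dict.getD_empty]
  simpa using pvCells_filter g 0 t

theorem pvOk_of_bound (g : List (List String)) :
    ∀ s : Int, (∀ i : Nat, i < g.length → 0 ≤ s - i → (s - i).toNat < (g.getD i []).length) →
      pvOk g s := by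
  induction g with
  | nil => intro s _; trivial
  | cons row rest ih =>
    intro s h
    refine ⟨fun hs => ?_, ih (s - 1) fun i hi hnn => ?_⟩
    · have := h 0 (by simp) (by omega)
      simpa using this
    · have := h (i + 1) (by simpa using hi) (by push_cast; omega)
      have harith : s - 1 - (i : Int) = s - ((i : Nat) + 1 : Nat) := by push_cast; omega
      rw [harith]
      simpa using this

-- ===== VERDICT (by name: the statement is the Claim_ definition above) =====
theorem first_row_minor_diag_spec : Claim_equal_first_row_minor_diag := by
  intro lst hDom hPre
  obtain ⟨hne, hlen⟩ := hPre
  unfold Spec_first_row_minor_diag first_row_minor_diag first_row_minor_diag_alt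
  obtain ⟨row0, rest, rfl⟩ : ∃ r t, lst = r :: t := by
    cases lst with
    | nil => exact absurd rfl hne
    | cons a b => exact ⟨a, b, rfl⟩
  simp only []
  set g := row0 :: rest with hg
  have hhead : ((PySem.List.pyGet? g 0).getD []) = row0 := by
    simp [hg]
  rw [hhead]
  set w : Nat := row0.length with hw
  -- each j in the range is a valid diagonal index
  have hmem : ∀ j : Int, j ∈ PySem.List.pyRange ((w : Int) - 2) (-1) (-1) →
      0 ≤ j ∧ j ≤ (w : Int) - 2 := by
    intro j hj
    have := PySem.List.mem_pyRange_neg_one.mp hj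
    omega
  have hok : ∀ j : Int, 0 ≤ j → j ≤ (w : Int) - 2 → pvOk g j := by
    intro j h0 h2
    apply pvOk_of_bound
    intro i hi hnn
    have hhd : g.headD [] = row0 := rfl
    by_cases hiw : i + 2 ≤ w
    · have := hlen i hi (by rw [hhd]; exact hiw)
      rw [hhd] at this
      omega
    · omega
  have hstep : ∀ (acc : List String) (j : Int),
      j ∈ PySem.List.pyRange ((w : Int) - 2) (-1) (-1) →
      (match pvInnerA g j "" with
        | some s => acc ++ [s]
        | none => acc)
      = acc ++ [PySem.Str.join "" (pvGather g j)] := by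
    intro acc j hj
    obtain ⟨h0, h2⟩ := hmem j hj
    rw [pvInnerA_eq g j "" (by simp [hg]) h0 (hok j h0 h2)]
    simp
  rw [PySem.List.foldl_congr_mem _ _ _ _ hstep]
  rw [PySem.List.foldl_append_singleton_eq_map]
  simp only [List.nil_append]
  apply List.map_congr_left
  intro j _
  rw [pvBucket_eq]
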